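-- pv_equiv track=rewrite | github.com/n-ponto/AutoScribe | PyScripts/Planning Algorithm Testing/LineDrawer.py | movesToPath
-- ===== SOURCE A (Python) =====
-- def movesToPath(moves: list, startPoint: tuple):
--     x, y = (startPoint)
--     x = int(x)
--     y = int(y)
--     coords = []
--     coords.append((x, y))
--     for dX, dY in moves:
--         x += dX
--         y += dY
--         coords.append((x, y))
--     return coords
-- ===== SOURCE B (Python) =====
-- def movesToPath(moves: list, startPoint: tuple):
--     def axis_path(start, deltas):
--         path = [start]
--         c = start
--         for d in deltas:
--             c += d
--             path.append(c)
--         return path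
--     xs = axis_path(int(startPoint[0]), [dX for dX, dY in moves])
--     ys = axis_path(int(startPoint[1]), [dY for dX, dY in moves])
--     return list(zip(xs, ys))
-- ===== Notes on version B (the rewrite author's own statement) =====
-- stated objective: alternative
-- what changed: Replaces the single interleaved loop maintaining a running (x,y) pair with two independent per-axis prefix-sum passes (a shared axis_path helper over the projected deltas) joined by zip.
import Mathlib
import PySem

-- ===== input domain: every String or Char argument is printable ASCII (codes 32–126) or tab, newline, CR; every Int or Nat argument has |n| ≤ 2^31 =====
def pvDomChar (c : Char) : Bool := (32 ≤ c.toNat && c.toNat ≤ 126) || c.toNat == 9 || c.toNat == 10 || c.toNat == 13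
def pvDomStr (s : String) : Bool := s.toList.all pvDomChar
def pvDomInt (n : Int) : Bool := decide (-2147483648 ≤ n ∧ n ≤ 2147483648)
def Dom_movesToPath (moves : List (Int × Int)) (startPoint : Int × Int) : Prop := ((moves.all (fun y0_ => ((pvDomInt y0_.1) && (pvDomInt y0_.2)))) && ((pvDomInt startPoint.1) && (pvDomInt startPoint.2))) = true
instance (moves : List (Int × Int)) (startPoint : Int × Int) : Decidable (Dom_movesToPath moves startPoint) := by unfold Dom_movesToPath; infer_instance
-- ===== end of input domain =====

-- B replaces A's single interleaved running-(x,y) loop with two independent per-axis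
-- prefix-sum passes joined by zip (objective: alternative decomposition, same cost).

-- ===== PORT A =====
-- A: one loop over moves keeping a running (x, y) and appending each point to coords.
def movesToPath (moves : List (Int × Int)) (startPoint : Int × Int) : List (Int × Int) :=
  let x := startPoint.1
  let y := startPoint.2
  let coords : List (Int × Int) := [] ++ [(x, y)]
  let st := moves.foldl
    (fun (st : Int × Int × List (Int × Int)) m =>
      let x := st.1 + m.1
      let y := st.2.1 + m.2
      (x, y, st.2.2 ++ [(x, y)]))
    (x, y, coords)
  st.2.2

-- ===== PORT B =====
-- B's axis_path helper: one-axis cumulative path from a start over a list of deltas.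
def axisPath (start : Int) (deltas : List Int) : List Int :=
  let st := deltas.foldl
    (fun (st : List Int × Int) d =>
      let c := st.2 + d
      (st.1 ++ [c], c))
    ([start], start)
  st.1

def movesToPath_alt (moves : List (Int × Int)) (startPoint : Int × Int) : List (Int × Int) :=
  let xs := axisPath startPoint.1 (moves.map (fun m => m.1))
  let ys := axisPath startPoint.2 (moves.map (fun m => m.2))
  xs.zip ys

-- ===== PRECONDITION & SPEC =====
def Spec_movesToPath (moves : List (Int × Int)) (startPoint : Int × Int) (out : List (Int × Int)) : Prop := out = movesToPath_alt moves startPoint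
instance (moves : List (Int × Int)) (startPoint : Int × Int) (out : List (Int × Int)) : Decidable (Spec_movesToPath moves startPoint out) := by unfold Spec_movesToPath; infer_instance

-- ===== CLAIM (what is proved, stated in full; the proofs are below) =====
def Claim_equal_movesToPath : Prop := ∀ (moves : List (Int × Int)) (startPoint : Int × Int), Dom_movesToPath moves startPoint → Spec_movesToPath moves startPoint (movesToPath moves startPoint)

-- ===== LEMMAS AND PROOFS =====

-- tail of the 2-D path after the start point
def tailPath (x y : Int) : List (Int × Int) → List (Int × Int)
  | [] => []
  | m :: ms => (x + m.1, y + m.2) :: tailPath (x + m.1) (y + m.2) ms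

-- tail of a 1-D prefix-sum path
def tail1 (c : Int) : List Int → List Int
  | [] => []
  | d :: ds => (c + d) :: tail1 (c + d) ds

lemma foldA_eq (moves : List (Int × Int)) (x y : Int) (acc : List (Int × Int)) :
    (moves.foldl
      (fun (st : Int × Int × List (Int × Int)) m =>
        let x := st.1 + m.1
        let y := st.2.1 + m.2
        (x, y, st.2.2 ++ [(x, y)]))
      (x, y, acc)).2.2 = acc ++ tailPath x y moves := by
  induction moves generalizing x y acc with
  | nil => simp [tailPath]
  | cons m ms ih => simp [List.foldl, tailPath, ih, List.append_assoc]

lemma foldX_eq (ds : List Int) (c : Int) (acc : List Int) :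
    (ds.foldl
      (fun (st : List Int × Int) d =>
        let c := st.2 + d
        (st.1 ++ [c], c))
      (acc, c)).1 = acc ++ tail1 c ds := by
  induction ds generalizing c acc with
  | nil => simp [tail1]
  | cons d ds ih => simp [List.foldl, tail1, ih, List.append_assoc]

lemma zip_tail (moves : List (Int × Int)) (x y : Int) :
    tailPath x y moves =
      (tail1 x (moves.map (fun m => m.1))).zip (tail1 y (moves.map (fun m => m.2))) := by
  induction moves generalizing x y with
  | nil => simp [tailPath, tail1]
  | cons m ms ih => simp [tailPath, tail1, List.zip, ih]

-- ===== VERDICT (by name: the statement is the Claim_ definition above) =====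
theorem movesToPath_spec : Claim_equal_movesToPath := by
  intro moves sp _
  show movesToPath moves sp = movesToPath_alt moves sp
  simp only [movesToPath, movesToPath_alt, axisPath, foldA_eq, foldX_eq]
  simp [zip_tail, List.zip]
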